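-- pv_equiv track=rewrite | github.com/kimsungmin1011/Algorithm | 프로그래머스/2/388352. 비밀 코드 해독/비밀 코드 해독.py | solution
-- ===== SOURCE A (Python) =====
-- def solution(n, q, ans):
--     answer = 0
--     number_list=[]
--     arr=[]
--
--     # 1 ~ n까지 숫자 중 5개를 조합 선택하는 백트래킹 함수
--     def dfs(idx):
--         if len(arr)==5:
--             number_list.append(arr[:])
--             return
--
--         for i in range(idx,n+1):
--             arr.append(i)
--             dfs(i+1)
--             arr.pop()
--
--     dfs(1)
--
--     for number in number_list:
--         # 현재 정수 조합을 모든 입력 정수와 비교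
--         flag = True
--         for m in range(len(q)):
--             count=0
--             # 입력 정수의 각 숫자가 현재 정수 조합에 있는지 탐색
--             for i in q[m]:
--                 if i in number:
--                     count+=1
--             # 시스템 응답과 일치하지 않는다면
--             if count!=ans[m]:
--                 flag=False
--                 break
--         # 현재 정수 조합이 모든 시도의 응답을 통과했다면
--         if flag==True:
--             answer+=1
--
--     return answer
-- ===== SOURCE B (Python) =====
-- def solution(n, q, ans):
--     answer = 0
--     for a in range(1, n + 1):
--         for b in range(a + 1, n + 1):
--             for c in range(b + 1, n + 1):
--                 for d in range(c + 1, n + 1):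
--                     for e in range(d + 1, n + 1):
--                         combo = (a, b, c, d, e)
--                         if all(sum(dg in combo for dg in qm) == am
--                                for qm, am in zip(q, ans)):
--                             answer += 1
--     return answer
-- ===== Notes on version B (the rewrite author's own statement) =====
-- stated objective: simpler
-- what changed: Replaces the recursive backtracking that materializes all 5-combinations into a list and then filters it with five nested increasing-range loops that check every query inline (via zip over q and ans) and count matches in one fused pass, with no recursion and no intermediate list.
-- outside the precondition, e.g. on solution(5, [[1], [1]], [0]): A returns 0, B returns 0
import Mathlib
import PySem

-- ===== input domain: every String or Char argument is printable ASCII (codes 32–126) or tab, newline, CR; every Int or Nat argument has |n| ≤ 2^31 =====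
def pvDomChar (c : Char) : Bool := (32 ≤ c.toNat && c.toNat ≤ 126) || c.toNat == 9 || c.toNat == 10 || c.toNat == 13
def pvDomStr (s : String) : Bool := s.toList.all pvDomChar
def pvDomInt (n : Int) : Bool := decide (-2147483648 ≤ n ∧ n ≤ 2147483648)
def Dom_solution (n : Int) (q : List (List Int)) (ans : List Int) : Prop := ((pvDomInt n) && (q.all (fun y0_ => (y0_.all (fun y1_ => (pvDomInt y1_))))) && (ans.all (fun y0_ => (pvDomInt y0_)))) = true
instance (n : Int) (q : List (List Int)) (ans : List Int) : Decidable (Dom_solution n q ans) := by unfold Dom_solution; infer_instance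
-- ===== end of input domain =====

-- B replaces A's recursive backtracking (which materializes every 5-combination into a
-- list and then filters it) by five nested increasing-range loops that check all the
-- queries inline (zipping q with ans) and count in one fused pass; objective: simpler.

-- ===== PORT A =====
-- A's dfs: builds the list of 5-element increasing combinations of 1..n, appending to a
-- growing prefix `arr`.  The fuel argument (= 5 - len(arr) at every reachable call) only
-- makes the recursion total; it never runs out when called as in `solution`.
def dfsA (n : Int) (fuel : Nat) (idx : Int) (arr : List Int) : List (List Int) :=
  if arr.length == 5 then [arr]
  else
    match fuel with
    | 0 => []
    | f + 1 =>
      (PySem.List.pyRange idx (n + 1) 1).foldl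
        (fun acc i => acc ++ dfsA n f (i + 1) (arr ++ [i])) []

-- A's inner loop `for m in range(len(q))` with its early `break`.
-- `ans[m]` is ported as pyGetD with default 0: Pre_solution guarantees the loop only ever
-- reads in-range indices (the out-of-range read is Python's IndexError, excluded by Pre_).
def checkLoopA (q : List (List Int)) (ans : List Int) (number : List Int) (m : Nat) : Bool :=
  if h : m < q.length then
    let count : Int := (q[m]).foldl (fun c i => if number.contains i then c + 1 else c) 0
    if count ≠ PySem.List.pyGetD ans (m : Int) 0 then false
    else checkLoopA q ans number (m + 1)
  else true
termination_by q.length - m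

def solution (n : Int) (q : List (List Int)) (ans : List Int) : Int :=
  (dfsA n 5 1 []).foldl
    (fun answer number => if checkLoopA q ans number 0 then answer + 1 else answer) 0

-- ===== PORT B =====
-- B's per-combination check: all(sum(dg in combo for dg in qm) == am for qm, am in zip(q, ans))
def checkB (q : List (List Int)) (ans : List Int) (combo : List Int) : Bool :=
  (q.zip ans).all
    (fun p => (p.1.foldl (fun c dg => c + (if combo.contains dg then 1 else 0)) (0 : Int)) == p.2)

def solution_alt (n : Int) (q : List (List Int)) (ans : List Int) : Int :=
  (PySem.List.pyRange 1 (n + 1) 1).foldl (fun acc a =>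
    (PySem.List.pyRange (a + 1) (n + 1) 1).foldl (fun acc b =>
      (PySem.List.pyRange (b + 1) (n + 1) 1).foldl (fun acc c =>
        (PySem.List.pyRange (c + 1) (n + 1) 1).foldl (fun acc d =>
          (PySem.List.pyRange (d + 1) (n + 1) 1).foldl (fun acc e =>
            acc + (if checkB q ans [a, b, c, d, e] then 1 else 0)) acc) acc) acc) acc) 0

-- ===== PRECONDITION & SPEC =====
-- Pre_ excludes inputs on which A can raise IndexError reading ans[m] (more queries than
-- answers while some combination exists); it is slightly wider than the exact raise set:
-- with len(ans) < len(q) A still returns 0 when every combination fails early (see cites).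
def Pre_solution (n : Int) (q : List (List Int)) (ans : List Int) : Prop :=
  n < 5 ∨ q.length ≤ ans.length
instance (n : Int) (q : List (List Int)) (ans : List Int) : Decidable (Pre_solution n q ans) := by
  unfold Pre_solution; infer_instance

def pvWitness_solution : Int × List (List Int) × List Int := (6, [[1, 2, 9], [3]], [2, 0])

def Spec_solution (n : Int) (q : List (List Int)) (ans : List Int) (out : Int) : Prop := out = solution_alt n q ans
instance (n : Int) (q : List (List Int)) (ans : List Int) (out : Int) : Decidable (Spec_solution n q ans out) := by unfold Spec_solution; infer_instance

-- ===== CLAIM (what is proved, stated in full; the proofs are below) =====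
def Claim_equal_solution : Prop := ∀ (n : Int) (q : List (List Int)) (ans : List Int), Dom_solution n q ans → Pre_solution n q ans → Spec_solution n q ans (solution n q ans)

-- ===== LEMMAS AND PROOFS =====

-- The list of strictly increasing k-element combinations drawn from idx..n, in A's order.
def combos (n : Int) : Nat → Int → List (List Int)
  | 0, _ => [[]]
  | k + 1, idx =>
    (PySem.List.pyRange idx (n + 1) 1).flatMap
      (fun i => (combos n k (i + 1)).map (i :: ·))

-- dfsA produces exactly the combinations with the current prefix glued on.
lemma dfsA_eq_combos (n : Int) :
    ∀ (f : Nat) (idx : Int) (arr : List Int), arr.length + f = 5 →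
      dfsA n f idx arr = (combos n f idx).map (arr ++ ·) := by
  intro f
  induction f with
  | zero =>
    intro idx arr h
    simp at h
    simp [dfsA, combos, h]
  | succ f ih =>
    intro idx arr h
    have hlen : arr.length ≠ 5 := by omega
    unfold dfsA
    simp only [beq_iff_eq, hlen, if_false]
    rw [PySem.List.foldl_append_eq_flatMap]
    have hrec : ∀ i : Int, dfsA n f (i + 1) (arr ++ [i]) =
        (combos n f (i + 1)).map ((arr ++ [i]) ++ ·) := by
      intro i
      exact ih (i + 1) (arr ++ [i]) (by simp; omega)
    simp only [hrec, combos, List.map_flatMap, List.map_map]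
    apply List.flatMap_congr
    intro i _
    apply List.map_congr_left
    intro t _
    simp

lemma combos_nil (n : Int) :
    ∀ (k : Nat) (idx : Int), n < idx + k → combos n (k + 1) idx = [] := by
  intro k
  induction k with
  | zero =>
    intro idx h
    simp only [combos]
    rw [PySem.List.pyRange_one_eq_nil (by omega)]
    simp
  | succ k ih =>
    intro idx h
    simp only [combos]
    rw [List.flatMap_eq_nil_iff]
    intro i hi
    have := (PySem.List.mem_pyRange_one.mp hi)
    have h2 := ih (i + 1) (by omega)
    simp only [combos] at h2
    rw [h2]
    simp

-- A's counting step rewritten as an accumulator-plus-indicator step.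
lemma count_step_eq (number : List Int) :
    (fun (c : Int) (i : Int) => if number.contains i then c + 1 else c) =
    (fun (c : Int) (i : Int) => c + (if number.contains i then 1 else 0)) := by
  funext c i
  split <;> ring

-- Under Pre_'s length condition, A's indexed loop with break equals B's zip-all check.
lemma checkLoopA_eq_checkB (q : List (List Int)) (ans : List Int) (number : List Int)
    (hlen : q.length ≤ ans.length) :
    ∀ (k m : Nat), q.length - m = k →
      checkLoopA q ans number m =
        ((q.drop m).zip (ans.drop m)).all
          (fun p => (p.1.foldl (fun c dg => c + (if number.contains dg then 1 else 0)) (0 : Int)) == p.2) := by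
  intro k
  induction k with
  | zero =>
    intro m hm
    have h1 : ¬ m < q.length := by omega
    unfold checkLoopA
    rw [dif_neg h1]
    rw [List.drop_eq_nil_of_le (by omega)]
    simp
  | succ k ih =>
    intro m hm
    have h1 : m < q.length := by omega
    have h2 : m < ans.length := by omega
    unfold checkLoopA
    rw [dif_pos h1]
    rw [List.drop_eq_getElem_cons h1, List.drop_eq_getElem_cons h2]
    simp only [List.zip_cons_cons, List.all_cons]
    rw [ih (m + 1) (by omega)]
    rw [PySem.List.pyGetD_natCast, List.getD_eq_getElem ans 0 h2, count_step_eq]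
    simp [beq_eq_decide]

-- counting-by-sum view of a filtered count
lemma cnt_eq_sum (p : List Int → Bool) (L : List (List Int)) :
    L.foldl (fun a c => if p c then a + 1 else a) 0 =
      (L.map (fun c => if p c then (1 : Int) else 0)).sum := by
  have h : (fun (a : Int) (c : List Int) => if p c then a + 1 else a) =
      (fun (a : Int) (c : List Int) => a + (if p c then 1 else 0)) := by
    funext a c; split <;> ring
  rw [h, PySem.List.foldl_add]
  simp

lemma sum_map_flatMap (l : List Int) (g : Int → List (List Int)) (t : List Int → Int) :
    ((l.flatMap g).map t).sum = (l.map (fun a => ((g a).map t).sum)).sum := by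
  rw [List.map_flatMap, List.flatMap, List.sum_flatten]
  simp [Function.comp_def]

-- B's nested loops compute the filtered count over `combos n 5 1`.
lemma solution_alt_eq_cnt (n : Int) (q : List (List Int)) (ans : List Int) :
    solution_alt n q ans =
      ((combos n 5 1).map (fun c => if checkB q ans c then (1 : Int) else 0)).sum := by
  unfold solution_alt
  -- peel the five loops into nested sums, innermost first
  have l5 : ∀ (a b c d : Int) (acc lo : Int),
      (PySem.List.pyRange lo (n + 1) 1).foldl
        (fun acc e => acc + (if checkB q ans [a, b, c, d, e] then 1 else 0)) acc =
      acc + ((PySem.List.pyRange lo (n + 1) 1).map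
        (fun e => if checkB q ans [a, b, c, d, e] then (1 : Int) else 0)).sum := by
    intro a b c d acc lo
    exact PySem.List.foldl_add _ _ acc
  have l4 : ∀ (a b c : Int) (acc lo : Int),
      (PySem.List.pyRange lo (n + 1) 1).foldl
        (fun acc d => (PySem.List.pyRange (d + 1) (n + 1) 1).foldl
          (fun acc e => acc + (if checkB q ans [a, b, c, d, e] then 1 else 0)) acc) acc =
      acc + ((PySem.List.pyRange lo (n + 1) 1).map
        (fun d => ((PySem.List.pyRange (d + 1) (n + 1) 1).map
          (fun e => if checkB q ans [a, b, c, d, e] then (1 : Int) else 0)).sum)).sum := by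
    intro a b c acc lo
    simp only [l5]
    exact PySem.List.foldl_add _ _ acc
  have l3 : ∀ (a b : Int) (acc lo : Int),
      (PySem.List.pyRange lo (n + 1) 1).foldl
        (fun acc c => (PySem.List.pyRange (c + 1) (n + 1) 1).foldl
          (fun acc d => (PySem.List.pyRange (d + 1) (n + 1) 1).foldl
            (fun acc e => acc + (if checkB q ans [a, b, c, d, e] then 1 else 0)) acc) acc) acc =
      acc + ((PySem.List.pyRange lo (n + 1) 1).map
        (fun c => ((PySem.List.pyRange (c + 1) (n + 1) 1).map
          (fun d => ((PySem.List.pyRange (d + 1) (n + 1) 1).map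
            (fun e => if checkB q ans [a, b, c, d, e] then (1 : Int) else 0)).sum)).sum)).sum := by
    intro a b acc lo
    simp only [l4]
    exact PySem.List.foldl_add _ _ acc
  have l2 : ∀ (a : Int) (acc lo : Int),
      (PySem.List.pyRange lo (n + 1) 1).foldl
        (fun acc b => (PySem.List.pyRange (b + 1) (n + 1) 1).foldl
          (fun acc c => (PySem.List.pyRange (c + 1) (n + 1) 1).foldl
            (fun acc d => (PySem.List.pyRange (d + 1) (n + 1) 1).foldl
              (fun acc e => acc + (if checkB q ans [a, b, c, d, e] then 1 else 0)) acc) acc) acc) acc =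
      acc + ((PySem.List.pyRange lo (n + 1) 1).map
        (fun b => ((PySem.List.pyRange (b + 1) (n + 1) 1).map
          (fun c => ((PySem.List.pyRange (c + 1) (n + 1) 1).map
            (fun d => ((PySem.List.pyRange (d + 1) (n + 1) 1).map
              (fun e => if checkB q ans [a, b, c, d, e] then (1 : Int) else 0)).sum)).sum)).sum)).sum := by
    intro a acc lo
    simp only [l3]
    exact PySem.List.foldl_add _ _ acc
  simp only [l2]
  -- the combos side: unfold the five levels into the same nested sums
  rw [PySem.List.foldl_add, zero_add]
  simp only [combos, sum_map_flatMap, List.map_map, Function.comp_def, List.map_cons,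
    List.map_nil, List.sum_singleton]

theorem solution_spec_aux (n : Int) (q : List (List Int)) (ans : List Int)
    (hpre : Pre_solution n q ans) : solution n q ans = solution_alt n q ans := by
  have hA : solution n q ans =
      ((combos n 5 1).map
        (fun c => if checkLoopA q ans c 0 then (1 : Int) else 0)).sum := by
    unfold solution
    rw [dfsA_eq_combos n 5 1 [] (by simp)]
    simp only [List.nil_append, List.map_id']
    exact cnt_eq_sum _ _
  rw [hA, solution_alt_eq_cnt]
  rcases hpre with hn | hlen
  · rw [show (5 : Nat) = 4 + 1 from rfl, combos_nil n 4 1 (by omega)]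
    simp
  · congr 1
    apply List.map_congr_left
    intro c _
    have := checkLoopA_eq_checkB q ans c hlen q.length 0 (by omega)
    simp only [List.drop_zero] at this
    rw [this]
    rfl

-- ===== VERDICT (by name: the statement is the Claim_ definition above) =====
theorem solution_spec : Claim_equal_solution := by
  intro n q ans _ hpre
  unfold Spec_solution
  exact solution_spec_aux n q ans hpre
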